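-- pv_equiv track=rewrite | github.com/mysterion186/advent-of-code-2020 | day-4/day4.py | passport_info
-- ===== SOURCE A (Python) =====
-- def passport_info(char):
-- 	valide = 0
-- 	for i in range(len(char)):
-- 		if char[i:i+3]=="byr":
-- 			valide+=1
-- 		if char[i:i+3]=="iyr":
-- 			valide+=1
-- 		if char[i:i+3]=="eyr":
-- 			valide+=1
-- 		if char[i:i+3]=="hgt":
-- 			valide+=1
-- 		if char[i:i+3]=="hcl":
-- 			valide+=1
-- 		if char[i:i+3]=="ecl":
-- 			valide+=1
-- 		if char[i:i+3]=="pid":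
-- 			valide+=1
-- 	if valide == 7 :
-- 		return True
-- 	return False
-- ===== SOURCE B (Python) =====
-- def passport_info(char):
-- 	keys = ("byr", "iyr", "eyr", "hgt", "hcl", "ecl", "pid")
-- 	return sum(char.count(k) for k in keys) == 7
-- ===== Notes on version B (the rewrite author's own statement) =====
-- stated objective: idiomatic
-- what changed: Instead of scanning every string position and testing all seven 3-letter slices there, B loops over the seven keys and delegates each scan to str.count on the whole string (equal because no key overlaps itself), summing the counts.
import Mathlib
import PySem

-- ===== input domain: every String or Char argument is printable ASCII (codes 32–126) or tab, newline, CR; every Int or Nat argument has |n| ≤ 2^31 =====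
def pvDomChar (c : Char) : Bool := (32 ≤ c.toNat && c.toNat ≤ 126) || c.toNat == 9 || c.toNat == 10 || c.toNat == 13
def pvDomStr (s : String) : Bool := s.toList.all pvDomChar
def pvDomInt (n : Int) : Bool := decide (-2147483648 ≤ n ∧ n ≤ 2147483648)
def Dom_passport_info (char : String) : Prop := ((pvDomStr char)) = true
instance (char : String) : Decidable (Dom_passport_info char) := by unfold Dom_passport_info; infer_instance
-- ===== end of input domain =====

-- B replaces A's positional scan (testing all seven 3-letter slices at every index) with an
-- idiomatic sum of str.count over the seven keys (equal because no key overlaps itself).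

-- ===== PORT A =====
-- A's loop body: seven sequential ifs on char[i:i+3], each bumping valide
def pvStepA (char : String) (i : Int) (valide : Int) : Int :=
  let valide := if PySem.Str.slice char (some i) (some (i + 3)) == "byr" then valide + 1 else valide
  let valide := if PySem.Str.slice char (some i) (some (i + 3)) == "iyr" then valide + 1 else valide
  let valide := if PySem.Str.slice char (some i) (some (i + 3)) == "eyr" then valide + 1 else valide
  let valide := if PySem.Str.slice char (some i) (some (i + 3)) == "hgt" then valide + 1 else valide
  let valide := if PySem.Str.slice char (some i) (some (i + 3)) == "hcl" then valide + 1 else valide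
  let valide := if PySem.Str.slice char (some i) (some (i + 3)) == "ecl" then valide + 1 else valide
  let valide := if PySem.Str.slice char (some i) (some (i + 3)) == "pid" then valide + 1 else valide
  valide

-- A: for i in range(len(char)): seven ifs on char[i:i+3]; return valide == 7
def passport_info (char : String) : Bool :=
  let valide : Int :=
    (PySem.List.pyRange 0 (PySem.Str.len char) 1).foldl
      (fun valide i => pvStepA char i valide) 0
  if valide == 7 then true else false

-- ===== PORT B =====
-- B: keys = the seven 3-letter strings; return sum(char.count(k) for k in keys) == 7
def passport_info_alt (char : String) : Bool :=
  let keys : List String := ["byr", "iyr", "eyr", "hgt", "hcl", "ecl", "pid"]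
  (keys.map (fun k => (PySem.Str.count char k : Int))).sum == 7

-- ===== PRECONDITION & SPEC =====
def Spec_passport_info (char : String) (out : Bool) : Prop := out = passport_info_alt char
instance (char : String) (out : Bool) : Decidable (Spec_passport_info char out) := by unfold Spec_passport_info; infer_instance

-- ===== CLAIM (what is proved, stated in full; the proofs are below) =====
def Claim_equal_passport_info : Prop := ∀ (char : String), Dom_passport_info char → Spec_passport_info char (passport_info char)

-- ===== LEMMAS AND PROOFS =====

-- occurrence count of a 3-char key at every position of s (A's positional view)
def pvOcc (k : List Char) : List Char → Nat
  | [] => 0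
  | c :: t => (if (c :: t).take 3 = k then 1 else 0) + pvOcc k t

-- per-position contribution of A's seven ifs, as a function of the slice
def pvW (sl : List Char) : Int :=
  (if sl = ['b','y','r'] then 1 else 0) + (if sl = ['i','y','r'] then 1 else 0) +
  (if sl = ['e','y','r'] then 1 else 0) + (if sl = ['h','g','t'] then 1 else 0) +
  (if sl = ['h','c','l'] then 1 else 0) + (if sl = ['e','c','l'] then 1 else 0) +
  (if sl = ['p','i','d'] then 1 else 0)

-- Python str.count of a 3-char key whose first char differs from the other two
-- equals the positional occurrence count (occurrences cannot overlap).
theorem pvGo_eq (a b c : Char) (ha : a ≠ b) (hb : a ≠ c) :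
    ∀ (fuel : Nat) (s : List Char) (acc : Nat), s.length ≤ fuel →
      PySem.Chars.count.go [a, b, c] fuel s acc = acc + pvOcc [a, b, c] s := by
  intro fuel
  induction fuel with
  | zero =>
    intro s acc h
    have : s = [] := List.eq_nil_of_length_eq_zero (Nat.le_zero.mp h)
    subst this; simp [PySem.Chars.count.go, pvOcc]
  | succ f ih =>
    intro s acc h
    match s with
    | [] => simp [PySem.Chars.count.go, pvOcc]
    | c0 :: t =>
      by_cases hp : [a, b, c].isPrefixOf (c0 :: t) = true
      · have hpre : [a, b, c] <+: (c0 :: t) := List.isPrefixOf_iff_prefix.mp hp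
        obtain ⟨r, hr⟩ := hpre
        obtain ⟨hc0, ht⟩ : c0 = a ∧ t = b :: c :: r := by
          have h' := hr.symm
          simp only [List.cons_append, List.nil_append, List.cons.injEq] at h'
          exact ⟨h'.1, h'.2⟩
        subst ht
        have hgo : PySem.Chars.count.go [a, b, c] (f + 1) (c0 :: b :: c :: r) acc
            = PySem.Chars.count.go [a, b, c] f r (acc + 1) := by
          simp [PySem.Chars.count.go, hp]
        rw [hgo, ih r (acc + 1) (by simp at h; omega)]
        subst hc0
        simp [pvOcc, List.take, ha.symm, hb.symm]
        omega
      · have hgo : PySem.Chars.count.go [a, b, c] (f + 1) (c0 :: t) acc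
            = PySem.Chars.count.go [a, b, c] f t acc := by
          simp [PySem.Chars.count.go, hp]
        rw [hgo, ih t acc (by simp at h; omega)]
        have hne : ¬ (c0 :: t).take 3 = [a, b, c] := by
          intro he
          exact hp (List.isPrefixOf_iff_prefix.mpr (List.prefix_iff_eq_take.mpr (by simpa using he.symm)))
        have hocc : pvOcc [a, b, c] (c0 :: t) = pvOcc [a, b, c] t := by
          simp only [pvOcc, if_neg hne, Nat.zero_add]
        rw [hocc]

theorem pvCount_eq (a b c : Char) (ha : a ≠ b) (hb : a ≠ c) (s : List Char) :
    PySem.Chars.count s [a, b, c] = pvOcc [a, b, c] s := by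
  have h0 : PySem.Chars.count s [a, b, c] = PySem.Chars.count.go [a, b, c] s.length s 0 := by
    simp [PySem.Chars.count]
  rw [h0, pvGo_eq a b c ha hb s.length s 0 (le_refl _)]
  omega

-- the sum over all positions of pvW of the 3-slice equals the sum of the seven pvOcc's
theorem pvSum_eq (s : List Char) :
    ((List.range s.length).map (fun j => pvW ((s.drop j).take 3))).sum
      = (pvOcc ['b','y','r'] s : Int) + (pvOcc ['i','y','r'] s : Int) + (pvOcc ['e','y','r'] s : Int)
        + (pvOcc ['h','g','t'] s : Int) + (pvOcc ['h','c','l'] s : Int) + (pvOcc ['e','c','l'] s : Int)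
        + (pvOcc ['p','i','d'] s : Int) := by
  induction s with
  | nil => simp [pvOcc]
  | cons c t ih =>
    rw [List.length_cons, List.range_succ_eq_map]
    simp only [List.map_cons, List.map_map, List.sum_cons]
    have hmap : (List.range t.length).map ((fun j => pvW (((c :: t).drop j).take 3)) ∘ Nat.succ)
        = (List.range t.length).map (fun j => pvW ((t.drop j).take 3)) := by
      apply List.map_congr_left; intro j _; rfl
    rw [hmap, ih]
    simp only [List.drop_zero, pvOcc, pvW]
    push_cast
    ring_nf

-- a Bool-valued equality test on strings, read on the character lists
theorem pvBeq_eq (s t : String) : (s == t) = decide (s.toList = t.toList) := by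
  by_cases h : s = t
  · subst h; simp
  · have h2 : s.toList ≠ t.toList := fun hl => h (String.ext hl)
    simp [h, h2]

-- '+1 under an if' as adding an indicator
theorem pvAddIf (P : Prop) [Decidable P] (x : Int) :
    (if P then x + 1 else x) = x + (if P then 1 else 0) := by
  split_ifs <;> ring

-- A's loop body adds exactly pvW of the current 3-slice
theorem pvStepA_eq (char : String) (i : Int) (v : Int) :
    pvStepA char i v = v + pvW (PySem.List.slice char.toList (some i) (some (i + 3))) := by
  have hts : (PySem.Str.slice char (some i) (some (i + 3))).toList
      = PySem.List.slice char.toList (some i) (some (i + 3)) := by simp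
  unfold pvStepA pvW
  simp only [pvBeq_eq, decide_eq_true_eq, hts]
  have hb : ("byr" : String).toList = ['b','y','r'] := rfl
  have hi : ("iyr" : String).toList = ['i','y','r'] := rfl
  have he : ("eyr" : String).toList = ['e','y','r'] := rfl
  have hh : ("hgt" : String).toList = ['h','g','t'] := rfl
  have hc : ("hcl" : String).toList = ['h','c','l'] := rfl
  have hec : ("ecl" : String).toList = ['e','c','l'] := rfl
  have hp : ("pid" : String).toList = ['p','i','d'] := rfl
  simp only [hb, hi, he, hh, hc, hec, hp, pvAddIf]
  ring

-- (if b then true else false) is b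
theorem pvIfBool (b : Bool) : (if b then true else false) = b := by cases b <;> rfl

-- A's loop computes exactly the positional sum of pvW
theorem pvValide_eq (char : String) :
    passport_info char
      = (((List.range char.toList.length).map
            (fun j => pvW ((char.toList.drop j).take 3))).sum == 7) := by
  unfold passport_info
  simp only [pvStepA_eq]
  rw [PySem.List.pyRange_one]
  have hn : (PySem.Str.len char - 0).toNat = char.toList.length := by
    rw [PySem.Str.len_eq]; omega
  rw [hn, List.foldl_map, PySem.List.foldl_add]
  have hmap : (List.range char.toList.length).map
        (fun y : Nat => pvW (PySem.List.slice char.toList (some (0 + (y : Int))) (some (0 + (y : Int) + 3))))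
      = (List.range char.toList.length).map (fun j => pvW ((char.toList.drop j).take 3)) := by
    apply List.map_congr_left
    intro j _
    rw [zero_add]
    have h3 : ((j : Int) + 3) = ((j : Int) + ((3 : Nat) : Int)) := by norm_num
    rw [h3, PySem.List.slice_natCast_add]
  rw [hmap, zero_add, pvIfBool]

-- ===== VERDICT (by name: the statement is the Claim_ definition above) =====
theorem passport_info_spec : Claim_equal_passport_info := by
  intro char _
  unfold Spec_passport_info passport_info_alt
  rw [pvValide_eq char, pvSum_eq char.toList]
  simp only [List.map_cons, List.map_nil, List.sum_cons, List.sum_nil, PySem.Str.count]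
  have hb : ("byr" : String).toList = ['b','y','r'] := rfl
  have hi : ("iyr" : String).toList = ['i','y','r'] := rfl
  have he : ("eyr" : String).toList = ['e','y','r'] := rfl
  have hh : ("hgt" : String).toList = ['h','g','t'] := rfl
  have hc : ("hcl" : String).toList = ['h','c','l'] := rfl
  have hec : ("ecl" : String).toList = ['e','c','l'] := rfl
  have hp : ("pid" : String).toList = ['p','i','d'] := rfl
  simp only [hb, hi, he, hh, hc, hec, hp]
  rw [pvCount_eq 'b' 'y' 'r' (by decide) (by decide),
      pvCount_eq 'i' 'y' 'r' (by decide) (by decide),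
      pvCount_eq 'e' 'y' 'r' (by decide) (by decide),
      pvCount_eq 'h' 'g' 't' (by decide) (by decide),
      pvCount_eq 'h' 'c' 'l' (by decide) (by decide),
      pvCount_eq 'e' 'c' 'l' (by decide) (by decide),
      pvCount_eq 'p' 'i' 'd' (by decide) (by decide)]
  congr 1
  ring
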